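-- pv_equiv track=rewrite | github.com/helloAlgorithms/helloAlgorithms | programmers/mtak/120956.py | solution
-- ===== SOURCE A (Python) =====
-- def solution(babbling):
--     answer = 0
--     poss = {"aya", "ye", "woo", "ma"}
--     for t in babbling:
--         idx = -1
--         while True:
--             for p in poss:
--                 idx = t.find(p)
--                 if idx == 0:
--                     t = t[len(p):]
--                     break
--             if idx == 0:
--                 if t == "":
--                     answer += 1
--                     break
--             else:break
--     return answer
-- ===== SOURCE B (Python) =====
-- def solution(babbling):
--     words = ("aya", "ye", "woo", "ma")
--     count = 0
--     for t in babbling: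
--         n = len(t)
--         dp = [False] * (n + 1)
--         dp[0] = True
--         for i in range(1, n + 1):
--             dp[i] = any(
--                 i >= len(w) and dp[i - len(w)] and t[i - len(w):i] == w
--                 for w in words
--             )
--         if n > 0 and dp[n]:
--             count += 1
--     return count
-- ===== Notes on version B (the rewrite author's own statement) =====
-- stated objective: alternative
-- what changed: Replaces A's greedy while-loop that repeatedly strips a matching word prefix off each string with a per-string word-break DP table dp[i] (t[:i] is a concatenation of allowed words), counting nonempty strings with dp[len(t)] true.
import Mathlib
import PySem

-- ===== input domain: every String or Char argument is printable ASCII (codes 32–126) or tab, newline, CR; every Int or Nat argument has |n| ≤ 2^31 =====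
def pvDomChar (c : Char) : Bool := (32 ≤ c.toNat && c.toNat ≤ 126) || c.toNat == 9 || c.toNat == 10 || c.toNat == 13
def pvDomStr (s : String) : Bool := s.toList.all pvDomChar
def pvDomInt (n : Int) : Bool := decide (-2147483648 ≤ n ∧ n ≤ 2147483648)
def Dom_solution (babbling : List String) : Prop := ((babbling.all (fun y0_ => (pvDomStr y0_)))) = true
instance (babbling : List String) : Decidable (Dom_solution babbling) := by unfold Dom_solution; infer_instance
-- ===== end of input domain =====

-- B replaces A's greedy prefix-stripping while-loop by a word-break DP table per string; objective: alternative (same cost class).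

-- ===== PORT A =====
-- the set {"aya","ye","woo","ma"}; iteration order is immaterial: the loop only acts on a
-- prefix match (idx == 0), and at most one of these words can be a prefix of a given string
def pvTokens : List (List Char) := [['a','y','a'], ['y','e'], ['w','o','o'], ['m','a']]

-- the inner `for p in poss:` loop: idx = t.find(p); on idx == 0, t = t[len(p):] and break
def solInner : List (List Char) → Int → List Char → Int × List Char
  | [], idx, t => (idx, t)
  | p :: ps, _, t =>
      let i := PySem.Chars.find t p
      if i = 0 then (0, PySem.List.slice t (some (p.length : Int)) none)
      else solInner ps i t

-- termination of A's while-loop: a successful inner pass strictly shortens t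
theorem solInner_fst_zero {ps : List (List Char)} {idx : Int} {t t' : List Char}
    (hps : ∀ p ∈ ps, p ≠ []) (hidx : idx ≠ 0) (h : solInner ps idx t = (0, t')) :
    t'.length < t.length := by
  induction ps generalizing idx with
  | nil => exact absurd (congrArg Prod.fst h) hidx
  | cons p ps ih =>
    simp only [solInner] at h
    by_cases hf : PySem.Chars.find t p = 0
    · rw [if_pos hf] at h
      obtain ⟨-, ht'⟩ := Prod.mk.injEq .. ▸ h
      have h0 : (0:Int) ≤ PySem.Chars.find t p := le_of_eq hf.symm
      have hpre : p <+: t := by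
        have := (PySem.Chars.find_spec h0).1
        simpa [hf] using this
      have hple : p.length ≤ t.length := hpre.length_le
      have hp0 : p ≠ [] := hps p (by simp)
      have : t' = t.drop p.length := by
        rw [← ht']
        exact_mod_cast PySem.List.slice_from_natCast t p.length
      subst this
      simp only [List.length_drop]
      have : 0 < p.length := List.length_pos_iff.mpr hp0
      omega
    · rw [if_neg hf] at h
      exact ih (fun q hq => hps q (by simp [hq])) hf h

-- the `while True:` loop of A, one call per string; returns the 0/1 contribution to answer
def solWhile (t : List Char) : Int :=
  match h : solInner pvTokens (-1) t with
  | (i, t') =>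
    if hi : i = 0 then
      (if t' = [] then 1 else solWhile t')
    else 0
termination_by t.length
decreasing_by
  exact solInner_fst_zero (by decide) (by decide) (hi ▸ h)

def solution (babbling : List String) : Int :=
  babbling.foldl (fun answer s => answer + solWhile s.toList) 0

-- ===== PORT B =====
def pvWords : List (List Char) := [['a','y','a'], ['y','e'], ['w','o','o'], ['m','a']]

-- dp[i] = any(i >= len(w) and dp[i-len(w)] and t[i-len(w):i] == w for w in words)
-- (the index i - len(w) is guarded by len(w) <= i, so Nat subtraction matches Python)
def dpCell (t : List Char) (dp : List Bool) (i : Nat) : Bool :=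
  pvWords.any (fun w =>
    decide (w.length ≤ i) && dp.getD (i - w.length) false &&
    decide (PySem.List.slice t (some ((i - w.length : Nat) : Int)) (some (i : Int)) = w))

-- dp = [False]*(n+1); dp[0] = True; for i in range(1, n+1): dp[i] = …
def dpLoop (t : List Char) : List Bool :=
  (List.range' 1 t.length).foldl (fun dp i => dp.set i (dpCell t dp i))
    ((List.replicate (t.length + 1) false).set 0 true)

def solution_alt (babbling : List String) : Int :=
  babbling.foldl (fun count s =>
    let t := s.toList
    let dp := dpLoop t
    count + (if 0 < t.length ∧ dp.getD t.length false = true then 1 else 0)) 0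

-- ===== PRECONDITION & SPEC =====
def Spec_solution (babbling : List String) (out : Int) : Prop := out = solution_alt babbling
instance (babbling : List String) (out : Int) : Decidable (Spec_solution babbling out) := by unfold Spec_solution; infer_instance

-- ===== CLAIM (what is proved, stated in full; the proofs are below) =====
def Claim_equal_solution : Prop := ∀ (babbling : List String), Dom_solution babbling → Spec_solution babbling (solution babbling)

-- ===== LEMMAS AND PROOFS =====

-- s is a concatenation of babbling words
def Dec (s : List Char) : Prop :=
  ∃ ws : List (List Char), (∀ w ∈ ws, w ∈ pvWords) ∧ ws.flatten = s

theorem dec_nil : Dec [] := ⟨[], by simp⟩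

theorem pvWords_ne_nil {w : List Char} (hw : w ∈ pvWords) : w ≠ [] := by
  rcases (by simpa [pvWords] using hw : w = _ ∨ w = _ ∨ w = _ ∨ w = _) with rfl|rfl|rfl|rfl <;> decide

theorem pvUnique {t p q : List Char} (hp : p ∈ pvTokens) (hq : q ∈ pvTokens)
    (h1 : p <+: t) (h2 : q <+: t) : p = q := by
  simp only [pvTokens, List.mem_cons, List.not_mem_nil, or_false] at hp hq
  have hc := List.prefix_or_prefix_of_prefix h1 h2
  rcases hp with rfl|rfl|rfl|rfl <;> rcases hq with rfl|rfl|rfl|rfl <;>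
    first
      | rfl
      | (rcases hc with h|h <;> exact absurd h (by decide))

theorem find_zero_iff_prefix (t p : List Char) : PySem.Chars.find t p = 0 ↔ p <+: t := by
  constructor
  · intro h
    have := (PySem.Chars.find_spec (le_of_eq h.symm)).1
    simpa [h] using this
  · intro hpre
    have hne : PySem.Chars.find t p ≠ -1 := (PySem.Chars.find_ne_neg_one_iff t p).mpr hpre.isInfix
    have h0 : 0 ≤ PySem.Chars.find t p := by
      have := PySem.Chars.neg_one_le_find t p
      omega
    obtain ⟨hp, hmin⟩ := PySem.Chars.find_spec h0
    by_contra hne0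
    have hpos : 0 < (PySem.Chars.find t p).toNat := by omega
    exact hmin 0 hpos (by simpa using hpre)

theorem solInner_no_prefix {ps : List (List Char)} {idx : Int} {t : List Char}
    (h : ∀ p ∈ ps, ¬ p <+: t) (hidx : idx ≠ 0) : (solInner ps idx t).1 ≠ 0 := by
  induction ps generalizing idx with
  | nil => simpa [solInner] using hidx
  | cons p ps ih =>
    simp only [solInner]
    have hf : PySem.Chars.find t p ≠ 0 := fun hc =>
      h p (by simp) ((find_zero_iff_prefix t p).mp hc)
    rw [if_neg hf]
    exact ih (fun q hq => h q (by simp [hq])) hf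

theorem solInner_prefix {ps : List (List Char)} (idx : Int) {t w : List Char}
    (hU : ∀ p ∈ ps, ∀ q ∈ ps, p <+: t → q <+: t → p = q)
    (hw : w ∈ ps) (hpre : w <+: t) :
    solInner ps idx t = (0, t.drop w.length) := by
  induction ps generalizing idx with
  | nil => exact absurd hw (by simp)
  | cons p ps ih =>
    simp only [solInner]
    by_cases hf : PySem.Chars.find t p = 0
    · rw [if_pos hf]
      have hppre := (find_zero_iff_prefix t p).mp hf
      have hpw : p = w := hU p (by simp) w hw hppre hpre
      subst hpw
      rw [show PySem.List.slice t (some (p.length : Int)) none = t.drop p.length from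
        by exact_mod_cast PySem.List.slice_from_natCast t p.length]
    · rw [if_neg hf]
      have hwps : w ∈ ps := by
        rcases List.mem_cons.mp hw with rfl | h
        · exact absurd ((find_zero_iff_prefix t w).mpr hpre) hf
        · exact h
      exact ih _ (fun a ha b hb => hU a (by simp [ha]) b (by simp [hb])) hwps

-- front peel: a nonempty decomposable string starts with a unique word
theorem dec_iff_front {t : List Char} (ht : t ≠ []) :
    Dec t ↔ ∃ w ∈ pvWords, w <+: t ∧ Dec (t.drop w.length) := by
  constructor
  · rintro ⟨ws, hmem, rfl⟩
    cases ws with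
    | nil => simp at ht
    | cons w rest =>
      refine ⟨w, hmem w (by simp), ⟨rest.flatten, by simp⟩, rest, fun q hq => hmem q (by simp [hq]), ?_⟩
      simp
  · rintro ⟨w, hw, ⟨x, rfl⟩, ws, hmem, hfl⟩
    refine ⟨w :: ws, fun q hq => ?_, ?_⟩
    · rcases List.mem_cons.mp hq with rfl | h
      · exact hw
      · exact hmem q h
    · simp only [List.flatten_cons, hfl]
      simp

-- A-side characterization: solWhile is the 0/1 indicator of "nonempty and decomposable"
theorem solWhile_spec (t : List Char) :
    (t ≠ [] ∧ Dec t → solWhile t = 1) ∧ (¬ (t ≠ [] ∧ Dec t) → solWhile t = 0) := by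
  by_cases hex : ∃ w ∈ pvTokens, w <+: t
  · obtain ⟨w, hw, hpre⟩ := hex
    have hwne : w ≠ [] := pvWords_ne_nil (by exact hw)
    have htne : t ≠ [] := by
      rintro rfl
      exact hwne (List.prefix_nil.mp hpre)
    have hs := solInner_prefix (-1) (fun p hp q hq => pvUnique hp hq) hw hpre
    have hlt : (t.drop w.length).length < t.length := by
      have h1 : 0 < w.length := List.length_pos_iff.mpr hwne
      have h2 : 0 < t.length := List.length_pos_iff.mpr htne
      simp only [List.length_drop]
      omega
    have hrec := solWhile_spec (t.drop w.length)
    have hstep : solWhile t = if t.drop w.length = [] then 1 else solWhile (t.drop w.length) := by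
      rw [solWhile.eq_def]
      split
      next i t' heq =>
        rw [hs] at heq
        obtain ⟨rfl, rfl⟩ := Prod.mk.injEq .. ▸ heq.symm
        rw [dif_pos rfl]
    constructor
    · rintro ⟨-, hdec⟩
      obtain ⟨w', hw', hpre', hdec'⟩ := (dec_iff_front htne).mp hdec
      have : w' = w := pvUnique (by exact hw') hw hpre' hpre
      subst this
      rw [hstep]
      by_cases hnil : t.drop w'.length = []
      · rw [if_pos hnil]
      · rw [if_neg hnil]
        exact hrec.1 ⟨hnil, hdec'⟩
    · intro hnot
      have hndec : ¬ Dec t := fun hd => hnot ⟨htne, hd⟩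
      rw [hstep]
      by_cases hnil : t.drop w.length = []
      · exfalso
        exact hndec ((dec_iff_front htne).mpr ⟨w, hw, hpre, hnil ▸ dec_nil⟩)
      · rw [if_neg hnil]
        exact hrec.2 (fun hc => hndec ((dec_iff_front htne).mpr ⟨w, hw, hpre, hc.2⟩))
  · push Not at hex
    have hz : solWhile t = 0 := by
      rw [solWhile.eq_def]
      split
      next i t' heq =>
        have : i ≠ 0 := by
          have := solInner_no_prefix (idx := -1) hex (by decide)
          simpa [heq] using this
        rw [dif_neg this]
    refine ⟨?_, fun _ => hz⟩
    rintro ⟨htne, hdec⟩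
    obtain ⟨w, hw, hpre, -⟩ := (dec_iff_front htne).mp hdec
    exact absurd hpre (hex w hw)
termination_by t.length
decreasing_by
  simp only [List.length_drop]
  have h1 : 0 < w.length := List.length_pos_iff.mpr hwne
  have h2 : w.length ≤ t.length := hpre.length_le
  omega

-- back peel: decomposability of t[:i] through its last word
theorem dec_iff_back {t : List Char} {i : Nat} (h1 : 1 ≤ i) (h2 : i ≤ t.length) :
    Dec (t.take i) ↔
      ∃ w ∈ pvWords, w.length ≤ i ∧ (t.drop (i - w.length)).take w.length = w ∧
        Dec (t.take (i - w.length)) := by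
  have hlen : (t.take i).length = i := by simp [h2]
  constructor
  · rintro ⟨ws, hmem, hfl⟩
    rcases List.eq_nil_or_concat ws with rfl | ⟨ws₀, w, rfl⟩
    · exfalso
      have h0 : (t.take i).length = 0 := by rw [← hfl]; rfl
      omega
    · have hw : w ∈ pvWords := hmem w (by simp)
      have hfl' : ws₀.flatten ++ w = t.take i := by simpa using hfl
      have hlw : ws₀.flatten.length + w.length = i := by
        have := congrArg List.length hfl'
        simpa [hlen] using this
      have hwle : w.length ≤ i := by omega
      have ha : ws₀.flatten.length = i - w.length := by omega
      have htake : t.take (i - w.length) = ws₀.flatten := by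
        have e1 : t.take (i - w.length) = (t.take i).take (i - w.length) := by
          rw [List.take_take]
          congr 1
          omega
        rw [e1, ← hfl', ← ha, List.take_left]
      have e2 : t.take (i - w.length) ++ (t.drop (i - w.length)).take w.length = t.take i := by
        rw [← List.take_add]
        congr 1
        omega
      have hX : (t.drop (i - w.length)).take w.length = w := by
        rw [← hfl', htake] at e2
        exact List.append_cancel_left e2
      exact ⟨w, hw, hwle, hX, ws₀, fun q hq => hmem q (by simp [hq]), htake.symm⟩
  · rintro ⟨w, hw, hwle, hX, ws₀, hmem, hfl⟩
    refine ⟨ws₀ ++ [w], fun q hq => ?_, ?_⟩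
    · rcases List.mem_append.mp hq with h | h
      · exact hmem q h
      · obtain rfl := List.mem_singleton.mp h
        exact hw
    · have e2 : t.take (i - w.length) ++ (t.drop (i - w.length)).take w.length = t.take i := by
        rw [← List.take_add]
        congr 1
        omega
      rw [hX] at e2
      rw [List.flatten_append, List.flatten_cons, List.flatten_nil, List.append_nil, hfl]
      exact e2

theorem getD_set_ne {l : List Bool} {i j : Nat} {v d : Bool} (h : i ≠ j) :
    (l.set i v).getD j d = l.getD j d := by
  simp [List.getD_eq_getElem?_getD, List.getElem?_set_ne h]

-- invariant of B's dp fold: after indices 1..k, entry j ≤ k says "t[:j] is decomposable"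
theorem dpLoop_invariant (t : List Char) (k : Nat) (hk : k ≤ t.length) :
    ((List.range' 1 k).foldl (fun dp i => dp.set i (dpCell t dp i))
        ((List.replicate (t.length + 1) false).set 0 true)).length = t.length + 1 ∧
      ∀ j ≤ k, (((List.range' 1 k).foldl (fun dp i => dp.set i (dpCell t dp i))
        ((List.replicate (t.length + 1) false).set 0 true)).getD j false = true ↔ Dec (t.take j)) := by
  induction k with
  | zero =>
    refine ⟨by simp, ?_⟩
    intro j hj
    interval_cases j
    constructor
    · intro _
      exact dec_nil
    · intro _
      rw [List.replicate_succ]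
      rfl
  | succ k ih =>
    obtain ⟨ihlen, ihval⟩ := ih (by omega)
    rw [List.range'_concat, List.foldl_append, List.foldl_cons, List.foldl_nil]
    set dp := (List.range' 1 k).foldl (fun dp i => dp.set i (dpCell t dp i))
      ((List.replicate (t.length + 1) false).set 0 true) with hdp
    rw [show 1 + 1 * k = k + 1 from by omega]
    refine ⟨by rw [List.length_set]; exact ihlen, ?_⟩
    intro j hj
    by_cases hjk : j = k + 1
    · subst hjk
      have hlt : k + 1 < dp.length := by omega
      have hget : (dp.set (k + 1) (dpCell t dp (k + 1))).getD (k + 1) false = dpCell t dp (k + 1) := by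
        simp [List.getD_eq_getElem?_getD, List.getElem?_set_self hlt]
      rw [hget, dec_iff_back (by omega) hk]
      unfold dpCell
      simp only [List.any_eq_true, Bool.and_eq_true, decide_eq_true_eq]
      constructor
      · rintro ⟨w, hw, ⟨hle, hdpw⟩, hsl⟩
        have hw1 : 0 < w.length := List.length_pos_iff.mpr (pvWords_ne_nil hw)
        refine ⟨w, hw, hle, ?_, (ihval (k + 1 - w.length) (by omega)).mp hdpw⟩
        rw [PySem.List.slice_natCast] at hsl
        rwa [show k + 1 - (k + 1 - w.length) = w.length from by omega] at hsl
      · rintro ⟨w, hw, hle, hsl, hdec⟩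
        have hw1 : 0 < w.length := List.length_pos_iff.mpr (pvWords_ne_nil hw)
        refine ⟨w, hw, ⟨hle, (ihval (k + 1 - w.length) (by omega)).mpr hdec⟩, ?_⟩
        rw [PySem.List.slice_natCast, show k + 1 - (k + 1 - w.length) = w.length from by omega]
        exact hsl
    · rw [getD_set_ne (fun h => hjk h.symm)]
      exact ihval j (by omega)

theorem dpLoop_getD (t : List Char) (i : Nat) (hi : i ≤ t.length) :
    ((dpLoop t).getD i false = true ↔ Dec (t.take i)) :=
  (dpLoop_invariant t t.length le_rfl).2 i hi

theorem perString (t : List Char) :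
    solWhile t = (if 0 < t.length ∧ (dpLoop t).getD t.length false = true then 1 else 0) := by
  by_cases h : 0 < t.length ∧ (dpLoop t).getD t.length false = true
  · rw [if_pos h]
    refine (solWhile_spec t).1 ⟨List.ne_nil_of_length_pos h.1, ?_⟩
    have := (dpLoop_getD t t.length le_rfl).mp h.2
    simpa using this
  · rw [if_neg h]
    refine (solWhile_spec t).2 ?_
    rintro ⟨htne, hdec⟩
    exact h ⟨List.length_pos_iff.mpr htne, (dpLoop_getD t t.length le_rfl).mpr (by simpa using hdec)⟩

-- ===== VERDICT (by name: the statement is the Claim_ definition above) =====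
theorem solution_spec : Claim_equal_solution := by
  intro babbling _
  unfold Spec_solution solution solution_alt
  simp only [perString]
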